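-- pv_equiv track=rewrite | github.com/Evgya/Python | Yandex_training_1.0/6/J. Median of the union/Median_of_the_union.py | get_median_of_merge
-- ===== SOURCE A (Python) =====
-- def count_greater(x, _list):
--     return len(_list) - count_less(x + 1, _list)
--
-- def count_less(x, _list):
--     left_border = 0
--     right_border = len(_list) - 1
--     while left_border < right_border:
--         middle = (left_border + right_border)//2
--         if _list[middle] >= x:
--             right_border = middle
--         else:
--             left_border = middle + 1
--     if _list[left_border] < x:
--         return len(_list)
--     return left_border
--
-- def get_median_of_merge(seq1, seq2):
--     left_border = min(seq1[0], seq2[0])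
--     right_border = max(seq1[-1], seq2[-1])
--     while left_border < right_border:
--         mid = (left_border + right_border)//2
--         less_mid = count_less(mid, seq1) + count_less(mid, seq2)
--         greater_mid = count_greater(mid, seq1) + count_greater(mid, seq2)
--         if less_mid <= len(seq1) - 1 and greater_mid <= len(seq1):
--             return mid
--         if greater_mid > len(seq1):
--             left_border = mid + 1
--         if less_mid > len(seq1) - 1:
--             right_border = mid - 1
--     return left_border
-- ===== SOURCE B (Python) =====
-- def get_median_of_merge(seq1, seq2):
--     # Bisect on the VALUE: count how many elements of the union fall below a
--     # candidate and narrow the candidate range until the rank window fits.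
--     n = len(seq1)
--     total = n + len(seq2)
--
--     def first_ge(arr, x, lo, hi):
--         # index of the first element >= x within arr[lo..hi] (hi if none)
--         if lo >= hi:
--             return lo
--         mid = (lo + hi) // 2
--         return first_ge(arr, x, lo, mid) if arr[mid] >= x else first_ge(arr, x, mid + 1, hi)
--
--     def rank_below(x):
--         # how many elements of the union are < x
--         below = 0
--         for arr in (seq1, seq2):
--             j = first_ge(arr, x, 0, len(arr) - 1)
--             below += len(arr) if arr[j] < x else j
--         return below
--
--     def bisect(lo, hi):
--         if lo >= hi:
--             return lo
--         mid = (lo + hi) // 2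
--         below, above = rank_below(mid), total - rank_below(mid + 1)
--         if below <= n - 1 and above <= n:
--             return mid
--         return bisect(mid + 1 if above > n else lo,
--                       mid - 1 if below > n - 1 else hi)
--
--     return bisect(min(seq1[0], seq2[0]), max(seq1[-1], seq2[-1]))
-- ===== Notes on version B (the rewrite author's own statement) =====
-- stated objective: alternative
-- what changed: B re-decomposes A's value-range bisection: the two while-loops become recursive descents, count_less/count_greater are fused into a single rank_below helper (one lower-bound search per list, the upper count derived as total - rank_below(mid+1)), and the two border updates become one symmetric recursive call with each bound tightened independently; Pre_ excludes only the empty-sequence inputs on which A raises IndexError.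
import Mathlib
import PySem

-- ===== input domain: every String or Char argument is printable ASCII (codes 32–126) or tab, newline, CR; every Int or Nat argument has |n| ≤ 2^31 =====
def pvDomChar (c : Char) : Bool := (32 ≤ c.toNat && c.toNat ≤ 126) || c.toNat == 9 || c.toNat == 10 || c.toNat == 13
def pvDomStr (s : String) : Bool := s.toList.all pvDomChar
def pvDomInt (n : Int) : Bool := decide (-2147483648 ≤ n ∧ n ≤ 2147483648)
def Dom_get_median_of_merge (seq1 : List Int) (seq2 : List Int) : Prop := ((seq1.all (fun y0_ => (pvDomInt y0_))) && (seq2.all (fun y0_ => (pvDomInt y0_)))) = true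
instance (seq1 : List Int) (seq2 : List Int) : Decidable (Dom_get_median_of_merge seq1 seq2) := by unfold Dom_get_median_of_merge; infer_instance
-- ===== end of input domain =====

-- B re-expresses A's value-range bisection as a different decomposition: recursive descent
-- helpers instead of while loops, the two count helpers fused into one rank_below accumulation,
-- and one symmetric recursive call tightening each border independently; A = B is proved on
-- every pair of nonempty lists.


-- ===== PORT A =====
-- while-loop of count_less, with fuel for totality (inside Pre_ the fuel is never exhausted:
-- the interval shrinks every iteration); list indexing via pyGet? with .getD 0 (on nonempty
-- lists every index the loop reaches is in range, so no raise occurs)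
def pvClLoop (l : List Int) (x : Int) : Nat → Int → Int → Int
  | 0, left_border, _ => left_border
  | fuel + 1, left_border, right_border =>
    if left_border < right_border then
      let middle := PySem.Int.floordiv (left_border + right_border) 2
      if x ≤ (PySem.List.pyGet? l middle).getD 0 then
        pvClLoop l x fuel left_border middle
      else
        pvClLoop l x fuel (middle + 1) right_border
    else left_border

def count_less (x : Int) (l : List Int) : Int :=
  let left_border := pvClLoop l x l.length 0 ((l.length : Int) - 1)
  if (PySem.List.pyGet? l left_border).getD 0 < x then (l.length : Int)
  else left_border

def count_greater (x : Int) (l : List Int) : Int :=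
  (l.length : Int) - count_less (x + 1) l

-- the main while-loop of A, with fuel for totality (never exhausted: when the loop does not
-- return, at least one of the two conditions fires and the interval shrinks)
def pvMedLoop (seq1 seq2 : List Int) : Nat → Int → Int → Int
  | 0, left_border, _ => left_border
  | fuel + 1, left_border, right_border =>
    if left_border < right_border then
      let mid := PySem.Int.floordiv (left_border + right_border) 2
      let less_mid := count_less mid seq1 + count_less mid seq2
      let greater_mid := count_greater mid seq1 + count_greater mid seq2
      if less_mid ≤ (seq1.length : Int) - 1 ∧ greater_mid ≤ (seq1.length : Int) then mid
      else
        let left' := if greater_mid > (seq1.length : Int) then mid + 1 else left_border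
        let right' := if less_mid > (seq1.length : Int) - 1 then mid - 1 else right_border
        pvMedLoop seq1 seq2 fuel left' right'
    else left_border

def get_median_of_merge (seq1 : List Int) (seq2 : List Int) : Int :=
  let left_border := min ((PySem.List.pyGet? seq1 0).getD 0) ((PySem.List.pyGet? seq2 0).getD 0)
  let right_border := max ((PySem.List.pyGet? seq1 (-1)).getD 0) ((PySem.List.pyGet? seq2 (-1)).getD 0)
  pvMedLoop seq1 seq2 ((right_border - left_border).toNat + 1) left_border right_border

-- ===== PORT B =====
-- Source B's first_ge: recursive descent, well-founded recursion on the interval width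
def pvFirstGe (arr : List Int) (x : Int) (lo hi : Int) : Int :=
  if lo < hi then
    let mid := PySem.Int.floordiv (lo + hi) 2
    if (PySem.List.pyGet? arr mid).getD 0 ≥ x then pvFirstGe arr x lo mid
    else pvFirstGe arr x (mid + 1) hi
  else lo
termination_by (hi - lo).toNat
decreasing_by
  all_goals
    simp only [PySem.Int.floordiv_eq_ediv_of_pos (show (0:Int) < 2 by norm_num)]
    omega

-- Source B's rank_below: one accumulation over the two sequences
def pvRankBelow (seq1 seq2 : List Int) (x : Int) : Int :=
  [seq1, seq2].foldl (fun below arr =>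
    let j := pvFirstGe arr x 0 ((arr.length : Int) - 1)
    below + (if (PySem.List.pyGet? arr j).getD 0 < x then (arr.length : Int) else j)) 0

-- Source B's bisect: one symmetric recursive call, each border tightened independently
def pvBisect (seq1 seq2 : List Int) (lo hi : Int) : Int :=
  if lo < hi then
    if pvRankBelow seq1 seq2 (PySem.Int.floordiv (lo + hi) 2) ≤ (seq1.length : Int) - 1 ∧
        ((seq1.length : Int) + (seq2.length : Int)) - pvRankBelow seq1 seq2 (PySem.Int.floordiv (lo + hi) 2 + 1) ≤ (seq1.length : Int) then
      PySem.Int.floordiv (lo + hi) 2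
    else
      pvBisect seq1 seq2
        (if ((seq1.length : Int) + (seq2.length : Int)) - pvRankBelow seq1 seq2 (PySem.Int.floordiv (lo + hi) 2 + 1) > (seq1.length : Int) then
          PySem.Int.floordiv (lo + hi) 2 + 1
        else lo)
        (if pvRankBelow seq1 seq2 (PySem.Int.floordiv (lo + hi) 2) > (seq1.length : Int) - 1 then
          PySem.Int.floordiv (lo + hi) 2 - 1
        else hi)
  else lo
termination_by (hi - lo).toNat
decreasing_by
  all_goals
    simp only [PySem.Int.floordiv_eq_ediv_of_pos (show (0:Int) < 2 by norm_num)] at *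
    split <;> split <;> omega

def get_median_of_merge_alt (seq1 : List Int) (seq2 : List Int) : Int :=
  pvBisect seq1 seq2
    (min ((PySem.List.pyGet? seq1 0).getD 0) ((PySem.List.pyGet? seq2 0).getD 0))
    (max ((PySem.List.pyGet? seq1 (-1)).getD 0) ((PySem.List.pyGet? seq2 (-1)).getD 0))

-- ===== PRECONDITION & SPEC =====
-- Pre_ excludes exactly the inputs on which A raises: an empty seq1 or seq2 (IndexError on
-- seq[0]); everywhere else A returns and A = B is claimed.
def Pre_get_median_of_merge (seq1 : List Int) (seq2 : List Int) : Prop :=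
  seq1 ≠ [] ∧ seq2 ≠ []
instance (seq1 : List Int) (seq2 : List Int) : Decidable (Pre_get_median_of_merge seq1 seq2) := by
  unfold Pre_get_median_of_merge; infer_instance

def pvWitness_get_median_of_merge : List Int × List Int := ([1, 3], [2, 4])

def Spec_get_median_of_merge (seq1 : List Int) (seq2 : List Int) (out : Int) : Prop := out = get_median_of_merge_alt seq1 seq2
instance (seq1 : List Int) (seq2 : List Int) (out : Int) : Decidable (Spec_get_median_of_merge seq1 seq2 out) := by unfold Spec_get_median_of_merge; infer_instance

-- ===== CLAIM (what is proved, stated in full; the proofs are below) =====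
def Claim_equal_get_median_of_merge : Prop := ∀ (seq1 : List Int) (seq2 : List Int), Dom_get_median_of_merge seq1 seq2 → Pre_get_median_of_merge seq1 seq2 → Spec_get_median_of_merge seq1 seq2 (get_median_of_merge seq1 seq2)

-- ===== LEMMAS AND PROOFS =====

-- A's fueled inner loop agrees with B's recursive descent whenever the fuel exceeds the
-- interval width
lemma pvClLoop_eq_firstGe (l : List Int) (x : Int) :
    ∀ (fuel : Nat) (lo hi : Int), (hi - lo).toNat < fuel →
      pvClLoop l x fuel lo hi = pvFirstGe l x lo hi := by
  intro fuel
  induction fuel with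
  | zero => intro lo hi hf; omega
  | succ fuel ih =>
    intro lo hi hf
    rw [pvClLoop, pvFirstGe]
    by_cases hlr : lo < hi
    · have hmid : PySem.Int.floordiv (lo + hi) 2 = (lo + hi) / 2 :=
        PySem.Int.floordiv_eq_ediv_of_pos (by norm_num)
      simp only [hlr, if_true, hmid]
      split_ifs with htest
      · exact ih lo ((lo + hi) / 2) (by omega)
      · exact ih ((lo + hi) / 2 + 1) hi (by omega)
    · simp [hlr]

-- A's count_less on one list is B's per-list rank summand
lemma count_less_eq_rank (l : List Int) (x : Int) :
    count_less x l =
      (if (PySem.List.pyGet? l (pvFirstGe l x 0 ((l.length : Int) - 1))).getD 0 < x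
        then (l.length : Int) else pvFirstGe l x 0 ((l.length : Int) - 1)) := by
  cases l with
  | nil => simp [count_less, pvClLoop, pvFirstGe]
  | cons a tl =>
    rw [count_less]
    rw [pvClLoop_eq_firstGe (a :: tl) x (a :: tl).length 0 (((a :: tl).length : Int) - 1)
      (by simp only [List.length_cons]; omega)]

-- the sum of A's two count_less calls is B's rank_below
lemma count_less_sum_eq_rankBelow (seq1 seq2 : List Int) (x : Int) :
    count_less x seq1 + count_less x seq2 = pvRankBelow seq1 seq2 x := by
  simp only [pvRankBelow, List.foldl_cons, List.foldl_nil,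
    count_less_eq_rank seq1 x, count_less_eq_rank seq2 x]
  ring

-- both loops exit at once on an empty interval
lemma pvMedLoop_stop (seq1 seq2 : List Int) (fuel : Nat) (lo hi : Int) (h : ¬ lo < hi) :
    pvMedLoop seq1 seq2 fuel lo hi = lo := by
  cases fuel <;> simp [pvMedLoop, h]

lemma pvBisect_stop (seq1 seq2 : List Int) (lo hi : Int) (h : ¬ lo < hi) :
    pvBisect seq1 seq2 lo hi = lo := by
  rw [pvBisect, if_neg h]

-- A's fueled main loop agrees with B's recursive bisection whenever the fuel exceeds the
-- interval width
lemma pvMedLoop_eq_bisect (seq1 seq2 : List Int) :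
    ∀ (fuel : Nat) (lo hi : Int), (hi - lo).toNat < fuel →
      pvMedLoop seq1 seq2 fuel lo hi = pvBisect seq1 seq2 lo hi := by
  intro fuel
  induction fuel with
  | zero => intro lo hi hf; omega
  | succ fuel ih =>
    intro lo hi hf
    rw [pvMedLoop, pvBisect]
    by_cases hlr : lo < hi
    · have hmid : PySem.Int.floordiv (lo + hi) 2 = (lo + hi) / 2 :=
        PySem.Int.floordiv_eq_ediv_of_pos (by norm_num)
      simp only [hlr, if_true, hmid, count_greater,
        count_less_sum_eq_rankBelow seq1 seq2]
      have e2 : count_less ((lo + hi) / 2 + 1) seq1 + count_less ((lo + hi) / 2 + 1) seq2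
          = pvRankBelow seq1 seq2 ((lo + hi) / 2 + 1) :=
        count_less_sum_eq_rankBelow seq1 seq2 _
      by_cases hret : pvRankBelow seq1 seq2 ((lo + hi) / 2) ≤ (seq1.length : Int) - 1 ∧
          (seq1.length : Int) + (seq2.length : Int) - pvRankBelow seq1 seq2 ((lo + hi) / 2 + 1) ≤ (seq1.length : Int)
      · rw [if_pos (by omega), if_pos (by constructor <;> omega)]
      · rw [if_neg hret, if_neg (by omega)]
        have heq1 : (if (seq1.length : Int) - count_less ((lo + hi) / 2 + 1) seq1 +
              ((seq2.length : Int) - count_less ((lo + hi) / 2 + 1) seq2) > (seq1.length : Int)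
            then (lo + hi) / 2 + 1 else lo)
            = (if (seq1.length : Int) + (seq2.length : Int) - pvRankBelow seq1 seq2 ((lo + hi) / 2 + 1) > (seq1.length : Int)
            then (lo + hi) / 2 + 1 else lo) := by
          split_ifs <;> omega
        rw [heq1]
        split_ifs with hgi hli
        · rw [pvMedLoop_stop seq1 seq2 fuel _ _ (by omega),
            pvBisect_stop seq1 seq2 _ _ (by omega)]
        · exact ih _ _ (by omega)
        · exact ih _ _ (by omega)
        · exact absurd ⟨by omega, by omega⟩ hret
    · simp [hlr]

-- ===== VERDICT (by name: the statement is the Claim_ definition above) =====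
theorem get_median_of_merge_spec : Claim_equal_get_median_of_merge := by
  intro seq1 seq2 _hdom _hpre
  rw [Spec_get_median_of_merge]
  unfold get_median_of_merge get_median_of_merge_alt
  exact pvMedLoop_eq_bisect seq1 seq2 _ _ _ (by omega)
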